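-- pv_equiv track=rewrite | github.com/Andrealll/chatbot-test | astrobot_core/fetch_kb_from_hooks.py | _filter_content_by_headings
-- ===== SOURCE A (Python) =====
-- from typing import Any, Dict, List, Optional, Tuple, Iterable
--
-- def _filter_content_by_headings(
--     content_md: str,
--     allowed_headings: Optional[Iterable[str]],
-- ) -> str:
--     """
--     Filtra il markdown tenendo solo alcuni capitoli identificati dalle intestazioni:
--
--     - '# Titolo'
--     - '## Titolo'
--
--     Se allowed_headings è None → ritorna content_md senza modifiche.
--     Se non viene trovata nessuna sezione ammessa → ritorna l'originale (fall-back).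
--     """
--     if not content_md:
--         return ""
--
--     if not allowed_headings:
--         return content_md
--
--     allowed_set = {h.strip().lower() for h in allowed_headings}
--
--     lines = content_md.splitlines(keepends=False)
--
--     # Gestione eventuale frontmatter iniziale (--- ... ---)
--     frontmatter_lines: List[str] = []
--     body_lines: List[str] = []
--     in_frontmatter = False
--     front_done = False
--
--     for line in lines:
--         if not front_done and line.strip() == "---":
--             if not in_frontmatter:
--                 in_frontmatter = True
--             else:
--                 in_frontmatter = False
--                 front_done = True
--             frontmatter_lines.append(line)
--             continue
--
--         if in_frontmatter:
--             frontmatter_lines.append(line)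
--         else:
--             body_lines.append(line)
--
--     selected_body: List[str] = []
--     current_block: List[str] = []
--     current_heading: Optional[str] = None
--     blocks_to_keep: List[List[str]] = []
--
--     def flush_block():
--         if current_block and current_heading:
--             title_norm = current_heading.strip().lower()
--             if title_norm in allowed_set:
--                 blocks_to_keep.append(list(current_block))
--
--     for line in body_lines:
--         stripped = line.lstrip()
--
--         if stripped.startswith("# "):
--             flush_block()
--             current_block = [line]
--             current_heading = stripped[2:].strip()
--         elif stripped.startswith("## "):
--             flush_block()
--             current_block = [line]
--             current_heading = stripped[3:].strip()
--         else:
--             if current_block: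
--                 current_block.append(line)
--             else:
--                 continue
--
--     flush_block()
--
--     if not blocks_to_keep:
--         return content_md  # fall-back
--
--     selected_body = []
--     for block in blocks_to_keep:
--         selected_body.extend(block)
--         selected_body.append("")
--
--     result_lines: List[str] = []
--     if frontmatter_lines:
--         result_lines.extend(frontmatter_lines)
--         result_lines.append("")
--
--     result_lines.extend(selected_body)
--
--     return "\n".join(result_lines).strip() + "\n"
-- ===== SOURCE B (Python) =====
-- from typing import Iterable, Optional
--
--
-- def _filter_content_by_headings(
--     content_md: str,
--     allowed_headings: Optional[Iterable[str]],
-- ) -> str: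
--     """Single linear pass: route frontmatter lines and emit kept-section lines
--     as they are seen, instead of building per-block lists and flattening them."""
--     if not content_md:
--         return ""
--     if not allowed_headings:
--         return content_md
--
--     allowed = {h.strip().lower() for h in allowed_headings}
--     allowed.discard("")  # a blank heading can never open a kept section
--
--     front = []
--     out = []
--     in_frontmatter = False
--     front_done = False
--     keep = False
--
--     for line in content_md.splitlines():
--         if not front_done and line.strip() == "---":
--             front.append(line)
--             if in_frontmatter:
--                 front_done = True
--             in_frontmatter = not in_frontmatter
--         elif in_frontmatter:
--             front.append(line)
--         else:
--             stripped = line.lstrip()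
--             if stripped.startswith("# "):
--                 title = stripped[2:].strip().lower()
--             elif stripped.startswith("## "):
--                 title = stripped[3:].strip().lower()
--             else:
--                 if keep:
--                     out.append(line)
--                 continue
--             if keep:
--                 out.append("")  # close the previous kept section
--             keep = title in allowed
--             if keep:
--                 out.append(line)
--
--     if keep:
--         out.append("")
--     if not out:
--         return content_md  # no allowed section found: fall back
--
--     result = (front + [""]) if front else []
--     result += out
--     return "\n".join(result).strip() + "\n"
-- ===== Notes on version B (the rewrite author's own statement) =====
-- stated objective: simpler
-- what changed: Replaces A's two list-building passes (frontmatter split, then per-block lists flushed via a closure and flattened) by one linear pass that routes each line directly to the frontmatter or the output using a single 'keep' flag per section.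
import Mathlib
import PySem

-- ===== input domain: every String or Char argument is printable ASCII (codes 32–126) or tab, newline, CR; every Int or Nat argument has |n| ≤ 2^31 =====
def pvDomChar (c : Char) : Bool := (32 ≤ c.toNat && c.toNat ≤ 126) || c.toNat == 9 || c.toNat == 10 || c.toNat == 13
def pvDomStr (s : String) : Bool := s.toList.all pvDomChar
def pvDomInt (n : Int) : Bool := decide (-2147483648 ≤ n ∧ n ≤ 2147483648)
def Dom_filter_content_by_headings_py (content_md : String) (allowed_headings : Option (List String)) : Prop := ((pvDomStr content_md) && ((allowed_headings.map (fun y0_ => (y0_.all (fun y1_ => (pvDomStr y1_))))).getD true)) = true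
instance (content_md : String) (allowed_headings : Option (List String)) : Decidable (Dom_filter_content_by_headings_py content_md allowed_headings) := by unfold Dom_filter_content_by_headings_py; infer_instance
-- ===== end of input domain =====

-- B replaces A's two list-building passes (frontmatter split, then per-block lists
-- flushed and flattened) by one linear pass with a per-section 'keep' flag (objective: simpler).


-- ===== PORT A =====
-- frontmatter pass: for line in lines: route to frontmatter_lines or body_lines
def pvFrontPassA : List String → List String × List String × Bool × Bool → List String × List String × Bool × Bool
  | [], st => st
  | line :: rest, (fm, body, infm, done) =>
    if !done && (PySem.Str.strip line == "---") then
      if !infm then pvFrontPassA rest (fm ++ [line], body, true, done)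
      else pvFrontPassA rest (fm ++ [line], body, false, true)
    else if infm then pvFrontPassA rest (fm ++ [line], body, infm, done)
    else pvFrontPassA rest (fm, body ++ [line], infm, done)

-- flush_block(): append current_block to blocks_to_keep if its heading is allowed
def pvFlushA (allowed : PySem.Set String) (cb : List String) (ch : Option String)
    (blocks : List (List String)) : List (List String) :=
  if cb ≠ [] ∧ ch.getD "" ≠ "" then
    if PySem.Set.contains allowed (PySem.Str.lower (PySem.Str.strip (ch.getD ""))) then blocks ++ [cb]
    else blocks
  else blocks

-- block pass: for line in body_lines: start/extend current_block, flushing at headings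
def pvBodyPassA (allowed : PySem.Set String) :
    List String → List String × Option String × List (List String) → List String × Option String × List (List String)
  | [], st => st
  | line :: rest, (cb, ch, blocks) =>
    let stripped := PySem.Str.lstrip line
    if PySem.Str.startswith stripped "# " then
      pvBodyPassA allowed rest ([line], some (PySem.Str.strip (PySem.Str.slice stripped (some 2) none)), pvFlushA allowed cb ch blocks)
    else if PySem.Str.startswith stripped "## " then
      pvBodyPassA allowed rest ([line], some (PySem.Str.strip (PySem.Str.slice stripped (some 3) none)), pvFlushA allowed cb ch blocks)
    else if cb ≠ [] then pvBodyPassA allowed rest (cb ++ [line], ch, blocks)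
    else pvBodyPassA allowed rest (cb, ch, blocks)

def filter_content_by_headings_py (content_md : String) (allowed_headings : Option (List String)) : String :=
  if content_md = "" then ""
  else if allowed_headings.getD [] = [] then content_md
  else
      let hs := allowed_headings.getD []
      let allowed : PySem.Set String := PySem.Set.ofList (hs.map (fun h => PySem.Str.lower (PySem.Str.strip h)))
      let lines := PySem.Str.splitlines content_md
      let r := pvFrontPassA lines ([], [], false, false)
      let s := pvBodyPassA allowed r.2.1 ([], none, [])
      let blocks := pvFlushA allowed s.1 s.2.1 s.2.2
      if blocks = [] then content_md
      else
        let selected := blocks.foldl (fun acc b => acc ++ b ++ [""]) []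
        let rlines := (if r.1 ≠ [] then r.1 ++ [""] else []) ++ selected
        PySem.Str.strip (PySem.Str.join "\n" rlines) ++ "\n"

-- ===== PORT B =====
-- single pass: route each line to the frontmatter or (when the current section is kept) the output
def pvPassB (allowed : PySem.Set String) :
    List String → List String × List String × Bool × Bool × Bool → List String × List String × Bool × Bool × Bool
  | [], st => st
  | line :: rest, (fm, out, infm, done, keep) =>
    if !done && (PySem.Str.strip line == "---") then
      pvPassB allowed rest (fm ++ [line], out, !infm, (if infm then true else done), keep)
    else if infm then pvPassB allowed rest (fm ++ [line], out, infm, done, keep)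
    else
      let stripped := PySem.Str.lstrip line
      if PySem.Str.startswith stripped "# " then
        let title := PySem.Str.lower (PySem.Str.strip (PySem.Str.slice stripped (some 2) none))
        let out1 := if keep then out ++ [""] else out
        let keep' := PySem.Set.contains allowed title
        pvPassB allowed rest (fm, (if keep' then out1 ++ [line] else out1), infm, done, keep')
      else if PySem.Str.startswith stripped "## " then
        let title := PySem.Str.lower (PySem.Str.strip (PySem.Str.slice stripped (some 3) none))
        let out1 := if keep then out ++ [""] else out
        let keep' := PySem.Set.contains allowed title
        pvPassB allowed rest (fm, (if keep' then out1 ++ [line] else out1), infm, done, keep')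
      else if keep then pvPassB allowed rest (fm, out ++ [line], infm, done, keep)
      else pvPassB allowed rest (fm, out, infm, done, keep)

def filter_content_by_headings_py_alt (content_md : String) (allowed_headings : Option (List String)) : String :=
  if content_md = "" then ""
  else if allowed_headings.getD [] = [] then content_md
  else
      let hs := allowed_headings.getD []
      let allowed : PySem.Set String :=
        PySem.Set.discard (PySem.Set.ofList (hs.map (fun h => PySem.Str.lower (PySem.Str.strip h)))) ""
      let t := pvPassB allowed (PySem.Str.splitlines content_md) ([], [], false, false, false)
      let out := if t.2.2.2.2 then t.2.1 ++ [""] else t.2.1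
      if out = [] then content_md
      else PySem.Str.strip (PySem.Str.join "\n" ((if t.1 ≠ [] then t.1 ++ [""] else []) ++ out)) ++ "\n"

-- ===== PRECONDITION & SPEC =====
def Spec_filter_content_by_headings_py (content_md : String) (allowed_headings : Option (List String)) (out : String) : Prop := out = filter_content_by_headings_py_alt content_md allowed_headings
instance (content_md : String) (allowed_headings : Option (List String)) (out : String) : Decidable (Spec_filter_content_by_headings_py content_md allowed_headings out) := by unfold Spec_filter_content_by_headings_py; infer_instance

-- ===== CLAIM (what is proved, stated in full; the proofs are below) =====
def Claim_equal_filter_content_by_headings_py : Prop := ∀ (content_md : String) (allowed_headings : Option (List String)), Dom_filter_content_by_headings_py content_md allowed_headings → Spec_filter_content_by_headings_py content_md allowed_headings (filter_content_by_headings_py content_md allowed_headings)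

-- ===== LEMMAS AND PROOFS =====

-- proof-only helpers: the flattened shape of A's kept blocks, and A's flush condition as a Bool
def pvFlat (bs : List (List String)) : List String := bs.flatMap (fun b => b ++ [""])

def pvKeep (al : PySem.Set String) (cb : List String) (ch : Option String) : Bool :=
  decide (cb ≠ []) && decide (ch.getD "" ≠ "") &&
    PySem.Set.contains al (PySem.Str.lower (PySem.Str.strip (ch.getD "")))

theorem pvFlat_append (bs : List (List String)) (b : List String) :
    pvFlat (bs ++ [b]) = pvFlat bs ++ b ++ [""] := by
  simp [pvFlat]

theorem pvFlat_nil_iff (bs : List (List String)) : pvFlat bs = [] ↔ bs = [] := by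
  cases bs <;> simp [pvFlat]

theorem pvFoldl_flat (bs : List (List String)) :
    ∀ acc, bs.foldl (fun acc b => acc ++ b ++ [""]) acc = acc ++ pvFlat bs := by
  induction bs with
  | nil => intro acc; simp [pvFlat]
  | cons b bs ih => intro acc; simp [pvFlat, List.append_assoc, List.flatMap]

theorem pvFlushA_eq (al : PySem.Set String) (cb : List String) (ch : Option String)
    (blocks : List (List String)) :
    pvFlushA al cb ch blocks = if pvKeep al cb ch then blocks ++ [cb] else blocks := by
  unfold pvFlushA pvKeep
  by_cases h1 : cb = [] <;> by_cases h2 : ch.getD "" = "" <;>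
    by_cases h3 : PySem.Set.contains al (PySem.Str.lower (PySem.Str.strip (ch.getD ""))) = true <;>
    simp [h1, h2]

theorem pvKeep_append (al : PySem.Set String) (cb : List String) (line : String)
    (ch : Option String) (h : cb ≠ []) :
    pvKeep al (cb ++ [line]) ch = pvKeep al cb ch := by
  unfold pvKeep
  have h1 : decide (cb ≠ []) = true := by simpa using h
  have h2 : decide (cb ++ [line] ≠ []) = true := by simp
  rw [h1, h2]

theorem pv_dropWhile_prefix_fixed {p : Char → Bool} {l u : List Char}
    (hl : List.dropWhile p l = l) (hu : u <+: l) : List.dropWhile p u = u := by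
  cases u with
  | nil => simp
  | cons a u' =>
    cases l with
    | nil => simp at hu
    | cons b l' =>
      obtain ⟨t, ht⟩ := hu
      have hab : a = b := by
        have := congrArg (fun xs => List.head? xs) ht
        simpa using this
      have hpb : p b = false := by
        by_contra hpb
        simp only [Bool.not_eq_false] at hpb
        rw [List.dropWhile_cons, if_pos hpb] at hl
        have := congrArg List.length hl
        have hle := List.length_dropWhile_le p l'
        simp at this
        omega
      rw [List.dropWhile_cons, hab, if_neg (by simp [hpb])]

theorem pv_rstrip_prefix (t : List Char) : PySem.Chars.rstrip t <+: t := by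
  unfold PySem.Chars.rstrip
  conv_rhs => rw [← List.reverse_reverse t]
  exact List.reverse_prefix.mpr (List.dropWhile_suffix _)

theorem pv_lstrip_idem (l : List Char) :
    List.dropWhile PySem.Chars.isspace (PySem.Chars.lstrip l) = PySem.Chars.lstrip l := by
  unfold PySem.Chars.lstrip
  exact List.dropWhile_idempotent _ _

theorem pv_rstrip_idem (l : List Char) :
    PySem.Chars.rstrip (PySem.Chars.rstrip l) = PySem.Chars.rstrip l := by
  unfold PySem.Chars.rstrip
  rw [List.reverse_reverse, List.dropWhile_idempotent]

theorem pv_strip_idem_chars (l : List Char) :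
    PySem.Chars.strip (PySem.Chars.strip l) = PySem.Chars.strip l := by
  unfold PySem.Chars.strip
  have h1 : PySem.Chars.lstrip (PySem.Chars.rstrip (PySem.Chars.lstrip l))
      = PySem.Chars.rstrip (PySem.Chars.lstrip l) :=
    pv_dropWhile_prefix_fixed (pv_lstrip_idem l) (pv_rstrip_prefix _)
  rw [h1, pv_rstrip_idem]

theorem pvStrip_idem (x : String) :
    PySem.Str.strip (PySem.Str.strip x) = PySem.Str.strip x := by
  apply String.ext
  rw [PySem.Str.toList_strip, PySem.Str.toList_strip, pv_strip_idem_chars]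

theorem pvLower_eq_empty_iff (x : String) : PySem.Str.lower x = "" ↔ x = "" := by
  constructor
  · intro h
    apply String.ext
    have h2 := congrArg String.toList h
    rw [PySem.Str.toList_lower] at h2
    unfold PySem.Chars.lower at h2
    simpa using h2
  · intro h
    subst h
    apply String.ext
    rw [PySem.Str.toList_lower]
    unfold PySem.Chars.lower
    simp

theorem pvContains_discard (s : PySem.Set String) (x : String) :
    PySem.Set.contains (PySem.Set.discard s "") x = (decide (x ≠ "") && PySem.Set.contains s x) := by
  rw [Bool.eq_iff_iff]
  simp only [Bool.and_eq_true, decide_eq_true_eq, PySem.Set.contains_iff, PySem.Set.mem_discard]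
  tauto

theorem pv_keep_heading (alA alB : PySem.Set String)
    (HB : ∀ x, PySem.Set.contains alB x = (decide (x ≠ "") && PySem.Set.contains alA x))
    (u line : String) :
    PySem.Set.contains alB (PySem.Str.lower (PySem.Str.strip u))
      = pvKeep alA [line] (some (PySem.Str.strip u)) := by
  unfold pvKeep
  rw [HB]
  simp only [Option.getD_some, pvStrip_idem]
  by_cases hu : PySem.Str.strip u = ""
  · have h3 : PySem.Str.lower "" = "" := (pvLower_eq_empty_iff _).mpr rfl
    rw [hu]
    simp [h3]
  · have h2 : PySem.Str.lower (PySem.Str.strip u) ≠ "" := fun h => hu ((pvLower_eq_empty_iff _).mp h)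
    simp [hu, h2]

theorem pv_front_acc : ∀ (ls fm body : List String) (infm done : Bool),
    pvFrontPassA ls (fm, body, infm, done)
    = (fm ++ (pvFrontPassA ls ([], [], infm, done)).1,
       body ++ (pvFrontPassA ls ([], [], infm, done)).2.1,
       (pvFrontPassA ls ([], [], infm, done)).2.2.1,
       (pvFrontPassA ls ([], [], infm, done)).2.2.2) := by
  intro ls
  induction ls with
  | nil => intro fm body infm done; simp [pvFrontPassA]
  | cons line rest ih =>
    intro fm body infm done
    simp only [pvFrontPassA]
    by_cases hd : (!done && (PySem.Str.strip line == "---")) = true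
    · rw [if_pos hd, if_pos hd]
      by_cases hi : infm = true
      · simp only [hi, Bool.not_true, Bool.false_eq_true, if_false, List.nil_append]
        rw [ih (fm ++ [line]) body false true, ih [line] [] false true]
        simp [List.append_assoc]
      · simp only [Bool.not_eq_true] at hi
        simp only [hi, Bool.not_false, if_true, List.nil_append]
        rw [ih (fm ++ [line]) body true done, ih [line] [] true done]
        simp [List.append_assoc]
    · rw [if_neg hd, if_neg hd]
      by_cases hi : infm = true
      · simp only [hi, if_true, List.nil_append]
        rw [ih (fm ++ [line]) body true done, ih [line] [] true done]
        simp [List.append_assoc]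
      · simp only [Bool.not_eq_true] at hi
        simp only [hi, Bool.false_eq_true, if_false, List.nil_append]
        rw [ih fm (body ++ [line]) false done, ih [] [line] false done]
        simp [List.append_assoc]

theorem pv_main (alA alB : PySem.Set String)
    (HB : ∀ x, PySem.Set.contains alB x = (decide (x ≠ "") && PySem.Set.contains alA x)) :
    ∀ (ls fm : List String) (infm done : Bool)
      (cb : List String) (ch : Option String) (blocks : List (List String)),
    (∀ h, ch = some h → PySem.Str.strip h = h ∧ cb ≠ []) →
    pvPassB alB ls (fm, pvFlat blocks ++ (if pvKeep alA cb ch then cb else []), infm, done, pvKeep alA cb ch)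
    = (fm ++ (pvFrontPassA ls ([], [], infm, done)).1,
       pvFlat (pvBodyPassA alA (pvFrontPassA ls ([], [], infm, done)).2.1 (cb, ch, blocks)).2.2
         ++ (if pvKeep alA (pvBodyPassA alA (pvFrontPassA ls ([], [], infm, done)).2.1 (cb, ch, blocks)).1
                        (pvBodyPassA alA (pvFrontPassA ls ([], [], infm, done)).2.1 (cb, ch, blocks)).2.1
             then (pvBodyPassA alA (pvFrontPassA ls ([], [], infm, done)).2.1 (cb, ch, blocks)).1 else []),
       (pvFrontPassA ls ([], [], infm, done)).2.2.1,
       (pvFrontPassA ls ([], [], infm, done)).2.2.2,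
       pvKeep alA (pvBodyPassA alA (pvFrontPassA ls ([], [], infm, done)).2.1 (cb, ch, blocks)).1
                  (pvBodyPassA alA (pvFrontPassA ls ([], [], infm, done)).2.1 (cb, ch, blocks)).2.1) := by
  intro ls
  induction ls with
  | nil =>
    intro fm infm done cb ch blocks hch
    simp [pvPassB, pvFrontPassA, pvBodyPassA]
  | cons line rest ih =>
    intro fm infm done cb ch blocks hch
    simp only [pvPassB, pvFrontPassA, List.nil_append]
    by_cases hd : (!done && (PySem.Str.strip line == "---")) = true
    · rw [if_pos hd, if_pos hd]
      by_cases hi : infm = true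
      · simp only [hi, Bool.not_true, Bool.false_eq_true, if_false, if_true]
        rw [pv_front_acc rest [line] [] false true,
            ih (fm ++ [line]) false true cb ch blocks hch]
        simp [List.append_assoc]
      · simp only [Bool.not_eq_true] at hi
        simp only [hi, Bool.not_false, Bool.false_eq_true, if_false, if_true]
        rw [pv_front_acc rest [line] [] true done,
            ih (fm ++ [line]) true done cb ch blocks hch]
        simp [List.append_assoc]
    · rw [if_neg hd, if_neg hd]
      by_cases hi : infm = true
      · rw [if_pos hi, if_pos hi]
        rw [pv_front_acc rest [line] [] infm done,
            ih (fm ++ [line]) infm done cb ch blocks hch]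
        simp [List.append_assoc]
      · rw [if_neg hi, if_neg hi]
        rw [pv_front_acc rest [] [line] infm done]
        simp only [List.cons_append, List.nil_append, pvBodyPassA]
        have hout : (if pvKeep alA cb ch
              then (pvFlat blocks ++ (if pvKeep alA cb ch then cb else [])) ++ [""]
              else (pvFlat blocks ++ (if pvKeep alA cb ch then cb else [])))
            = pvFlat (pvFlushA alA cb ch blocks) := by
          rw [pvFlushA_eq]
          cases hk : pvKeep alA cb ch <;> simp [pvFlat_append, List.append_assoc]
        by_cases hs1 : PySem.Str.startswith (PySem.Str.lstrip line) "# " = true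
        · rw [if_pos hs1, if_pos hs1]
          rw [pv_keep_heading alA alB HB (PySem.Str.slice (PySem.Str.lstrip line) (some 2) none) line]
          rw [hout]
          have hch' : ∀ h, (some (PySem.Str.strip (PySem.Str.slice (PySem.Str.lstrip line) (some 2) none)) = some h) → PySem.Str.strip h = h ∧ [line] ≠ [] := by
            intro h hh
            injection hh with hh
            subst hh
            exact ⟨pvStrip_idem _, by simp⟩
          have hsplit : (if pvKeep alA [line] (some (PySem.Str.strip (PySem.Str.slice (PySem.Str.lstrip line) (some 2) none)))
                then pvFlat (pvFlushA alA cb ch blocks) ++ [line]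
                else pvFlat (pvFlushA alA cb ch blocks))
              = pvFlat (pvFlushA alA cb ch blocks)
                ++ (if pvKeep alA [line] (some (PySem.Str.strip (PySem.Str.slice (PySem.Str.lstrip line) (some 2) none))) then [line] else []) := by
            cases pvKeep alA [line] (some (PySem.Str.strip (PySem.Str.slice (PySem.Str.lstrip line) (some 2) none))) <;> simp
          rw [hsplit]
          rw [ih fm infm done [line]
              (some (PySem.Str.strip (PySem.Str.slice (PySem.Str.lstrip line) (some 2) none)))
              (pvFlushA alA cb ch blocks) hch']
        · rw [if_neg hs1, if_neg hs1]
          by_cases hs2 : PySem.Str.startswith (PySem.Str.lstrip line) "## " = true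
          · rw [if_pos hs2, if_pos hs2]
            rw [pv_keep_heading alA alB HB (PySem.Str.slice (PySem.Str.lstrip line) (some 3) none) line]
            rw [hout]
            have hch' : ∀ h, (some (PySem.Str.strip (PySem.Str.slice (PySem.Str.lstrip line) (some 3) none)) = some h) → PySem.Str.strip h = h ∧ [line] ≠ [] := by
              intro h hh
              injection hh with hh
              subst hh
              exact ⟨pvStrip_idem _, by simp⟩
            have hsplit : (if pvKeep alA [line] (some (PySem.Str.strip (PySem.Str.slice (PySem.Str.lstrip line) (some 3) none)))
                  then pvFlat (pvFlushA alA cb ch blocks) ++ [line]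
                  else pvFlat (pvFlushA alA cb ch blocks))
                = pvFlat (pvFlushA alA cb ch blocks)
                  ++ (if pvKeep alA [line] (some (PySem.Str.strip (PySem.Str.slice (PySem.Str.lstrip line) (some 3) none))) then [line] else []) := by
              cases pvKeep alA [line] (some (PySem.Str.strip (PySem.Str.slice (PySem.Str.lstrip line) (some 3) none))) <;> simp
            rw [hsplit]
            rw [ih fm infm done [line]
                (some (PySem.Str.strip (PySem.Str.slice (PySem.Str.lstrip line) (some 3) none)))
                (pvFlushA alA cb ch blocks) hch']
          · rw [if_neg hs2, if_neg hs2]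
            by_cases hk : pvKeep alA cb ch = true
            · have hcb : cb ≠ [] := by
                unfold pvKeep at hk
                simp only [Bool.and_eq_true, decide_eq_true_eq] at hk
                exact hk.1.1
              rw [if_pos hk, if_pos hcb]
              have hk' : pvKeep alA (cb ++ [line]) ch = true :=
                (pvKeep_append alA cb line ch hcb).trans hk
              have hch' : ∀ h, ch = some h → PySem.Str.strip h = h ∧ cb ++ [line] ≠ [] := by
                intro h hh
                exact ⟨(hch h hh).1, by simp⟩
              have ihx := ih fm infm done (cb ++ [line]) ch blocks hch'
              simp only [hk', if_true] at ihx
              simp only [hk, if_true, List.append_assoc]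
              exact ihx
            · have hk0 : pvKeep alA cb ch = false := by
                simpa using hk
              simp only [hk0, Bool.false_eq_true, if_false, List.append_nil]
              by_cases hcb : cb = []
              · subst hcb
                simp only [ne_eq, not_true_eq_false, if_false]
                have ihx := ih fm infm done [] ch blocks hch
                simp only [hk0, Bool.false_eq_true, if_false, List.append_nil] at ihx
                exact ihx
              · simp only [ne_eq, hcb, not_false_eq_true, if_true]
                have hk' : pvKeep alA (cb ++ [line]) ch = false :=
                  (pvKeep_append alA cb line ch hcb).trans hk0
                have hch' : ∀ h, ch = some h → PySem.Str.strip h = h ∧ cb ++ [line] ≠ [] := by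
                  intro h hh
                  exact ⟨(hch h hh).1, by simp⟩
                have ihx := ih fm infm done (cb ++ [line]) ch blocks hch'
                simp only [hk', Bool.false_eq_true, if_false, List.append_nil] at ihx
                exact ihx

-- ===== VERDICT (by name: the statement is the Claim_ definition above) =====
theorem pv_final : ∀ (content_md : String) (allowed_headings : Option (List String)),
    filter_content_by_headings_py content_md allowed_headings
      = filter_content_by_headings_py_alt content_md allowed_headings := by
  intro content_md allowed_headings
  simp only [filter_content_by_headings_py, filter_content_by_headings_py_alt]
  by_cases hc : content_md = ""
  · simp [hc]
  · simp only [hc, if_false]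
    by_cases ha : allowed_headings.getD [] = []
    · simp [ha]
    · simp only [ha, if_false]
      have HB : ∀ x, PySem.Set.contains (PySem.Set.discard (PySem.Set.ofList ((allowed_headings.getD []).map (fun h => PySem.Str.lower (PySem.Str.strip h)))) "") x
          = (decide (x ≠ "") && PySem.Set.contains (PySem.Set.ofList ((allowed_headings.getD []).map (fun h => PySem.Str.lower (PySem.Str.strip h)))) x) :=
        fun x => pvContains_discard _ x
      have hmain := pv_main _ (PySem.Set.discard (PySem.Set.ofList ((allowed_headings.getD []).map (fun h => PySem.Str.lower (PySem.Str.strip h)))) "") HB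
        (PySem.Str.splitlines content_md) [] false false [] none []
        (by intro h hh; cases hh)
      have hk0 : pvKeep (PySem.Set.ofList ((allowed_headings.getD []).map (fun h => PySem.Str.lower (PySem.Str.strip h)))) [] none = false := by
        simp [pvKeep]
      have hf0 : pvFlat [] = [] := rfl
      simp only [hk0, Bool.false_eq_true, if_false, List.append_nil, List.nil_append, hf0] at hmain
      rw [hmain]
      dsimp only
      generalize PySem.Set.ofList (List.map (fun h => PySem.Str.lower (PySem.Str.strip h)) (allowed_headings.getD [])) = alA
      generalize pvFrontPassA (PySem.Str.splitlines content_md) ([], [], false, false) = r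
      obtain ⟨fm1, bd1, i1, d1⟩ := r
      dsimp only
      generalize pvBodyPassA alA bd1 ([], none, []) = s
      obtain ⟨cb1, ch1, bl1⟩ := s
      dsimp only
      rw [pvFlushA_eq]
      cases hk : pvKeep alA cb1 ch1 with
      | false =>
        simp only [Bool.false_eq_true, if_false, List.append_nil]
        rw [pvFoldl_flat, List.nil_append]
        by_cases hb : bl1 = []
        · subst hb
          simp [pvFlat]
        · have hb2 : ¬ pvFlat bl1 = [] := fun h => hb ((pvFlat_nil_iff _).mp h)
          rw [if_neg hb, if_neg hb2]
      | true =>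
        simp only [if_true]
        rw [pvFoldl_flat, List.nil_append, pvFlat_append]
        have hne : ¬ (bl1 ++ [cb1] = []) := by simp
        have hne2 : ¬ ((pvFlat bl1 ++ cb1) ++ [""] = []) := by simp
        rw [if_neg hne, if_neg hne2]

theorem filter_content_by_headings_py_spec : Claim_equal_filter_content_by_headings_py := by
  intro content_md allowed_headings _hdom
  unfold Spec_filter_content_by_headings_py
  exact pv_final content_md allowed_headings
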